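-- pv_equiv track=rewrite | github.com/fservida/msc_autopsy_plugins | ismartalarm/ismartalarm/result.py | __get_device_type
-- ===== SOURCE A (Python) =====
-- def __get_device_type(action):
--     device_types = {
--         "Contact Sensor": (1, 2, 3, 4),
--         "Motion Detector": (5,),
--         "Smoke Detector": (8,),
--         "Unknown": (6, 7, 9, 10, 11, 12, 13, 14, 15)
--     }
--
--     for device_type, actions in device_types.items():
--         if action in actions:
--             return device_type
--     return "Unknown"
-- ===== SOURCE B (Python) =====
-- def __get_device_type(action):
--     reverse = {
--         1: "Contact Sensor",
--         2: "Contact Sensor",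
--         3: "Contact Sensor",
--         4: "Contact Sensor",
--         5: "Motion Detector",
--         8: "Smoke Detector",
--     }
--     return reverse.get(action, "Unknown")
-- ===== Notes on version B (the rewrite author's own statement) =====
-- stated objective: simpler
-- what changed: Replaces the loop over grouped (type, action-tuple) entries and its tuple-membership tests with one flat per-action reverse-lookup dict and a single .get with 'Unknown' as default (so the explicit Unknown group disappears).
import Mathlib
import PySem

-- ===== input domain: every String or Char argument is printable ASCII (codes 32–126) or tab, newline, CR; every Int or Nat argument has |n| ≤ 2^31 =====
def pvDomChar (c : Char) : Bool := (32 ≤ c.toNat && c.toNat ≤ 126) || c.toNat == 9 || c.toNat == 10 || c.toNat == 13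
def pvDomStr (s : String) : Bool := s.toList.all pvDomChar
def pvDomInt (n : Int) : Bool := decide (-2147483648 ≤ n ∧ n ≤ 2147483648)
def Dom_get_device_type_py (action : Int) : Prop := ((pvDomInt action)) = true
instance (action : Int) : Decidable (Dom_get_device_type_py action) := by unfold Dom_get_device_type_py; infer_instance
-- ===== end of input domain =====

-- B replaces the grouped-tuples loop with a flat per-action reverse-lookup dict (simpler).


-- ===== PORT A =====
-- A: loop over grouped device_types entries, returning the first group whose tuple contains action
def pvA_loop (entries : List (String × List Int)) (action : Int) : String :=
  match entries with
  | [] => "Unknown"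
  | (device_type, actions) :: rest =>
      if actions.contains action then device_type else pvA_loop rest action

def get_device_type_py (action : Int) : String :=
  pvA_loop [("Contact Sensor", [1, 2, 3, 4]),
            ("Motion Detector", [5]),
            ("Smoke Detector", [8]),
            ("Unknown", [6, 7, 9, 10, 11, 12, 13, 14, 15])] action

-- ===== PORT B =====
-- B: flat reverse-lookup dict action → device type, .get with default "Unknown"
def pvB_reverse : PySem.Dict Int String :=
  PySem.Dict.ofList
  [((1:Int), "Contact Sensor"), (2, "Contact Sensor"), (3, "Contact Sensor"),
   (4, "Contact Sensor"), (5, "Motion Detector"), (8, "Smoke Detector")]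

def get_device_type_py_alt (action : Int) : String :=
  PySem.Dict.getD pvB_reverse action "Unknown"

-- ===== PRECONDITION & SPEC =====
def Spec_get_device_type_py (action : Int) (out : String) : Prop := out = get_device_type_py_alt action
instance (action : Int) (out : String) : Decidable (Spec_get_device_type_py action out) := by unfold Spec_get_device_type_py; infer_instance

-- ===== CLAIM (what is proved, stated in full; the proofs are below) =====
def Claim_equal_get_device_type_py : Prop := ∀ (action : Int), Dom_get_device_type_py action → Spec_get_device_type_py action (get_device_type_py action)

-- ===== LEMMAS AND PROOFS =====

-- ===== VERDICT (by name: the statement is the Claim_ definition above) =====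
theorem get_device_type_py_spec : Claim_equal_get_device_type_py := by
  intro a _
  unfold Spec_get_device_type_py get_device_type_py get_device_type_py_alt pvB_reverse
  by_cases h1 : a = 1; · subst h1; decide
  by_cases h2 : a = 2; · subst h2; decide
  by_cases h3 : a = 3; · subst h3; decide
  by_cases h4 : a = 4; · subst h4; decide
  by_cases h5 : a = 5; · subst h5; decide
  by_cases h6 : a = 6; · subst h6; decide
  by_cases h7 : a = 7; · subst h7; decide
  by_cases h8 : a = 8; · subst h8; decide
  by_cases h9 : a = 9; · subst h9; decide
  by_cases h10 : a = 10; · subst h10; decide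
  by_cases h11 : a = 11; · subst h11; decide
  by_cases h12 : a = 12; · subst h12; decide
  by_cases h13 : a = 13; · subst h13; decide
  by_cases h14 : a = 14; · subst h14; decide
  by_cases h15 : a = 15; · subst h15; decide
  have r : ∀ k : Int, ¬ a = k → (k == a) = false := fun k h => beq_eq_false_iff_ne.mpr (Ne.symm h)
  simp [pvA_loop, PySem.Dict.getD, PySem.Dict.get?, PySem.Dict.ofList, PySem.Dict.update,
        PySem.Dict.insert, PySem.Dict.empty, PySem.Dict.contains, List.find?, -List.elem_eq_contains,
        h1, h2, h3, h4, h5, h6, h7, h8, h9, h10, h11, h12, h13, h14, h15,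
        r 1 h1, r 2 h2, r 3 h3, r 4 h4, r 5 h5, r 8 h8]
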